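-- pv_equiv track=rewrite | github.com/aastrand/aoc2019 | 6/solve.py | count_all_edges
-- ===== SOURCE A (Python) =====
-- def count_all_edges(dag):
--     count = 0
--     for key in dag.keys():
--         neighbour = dag.get(key)
--         while (neighbour is not None):
--             count += 1
--             neighbour = dag.get(neighbour)
--
--     return count
-- ===== SOURCE B (Python) =====
-- def count_all_edges(dag):
--     # memoize each node's distance-to-root once, walking each chain only until a memoized node
--     depth = {}
--     total = 0
--     for k in dag.keys():
--         node = k
--         path = []
--         while node in dag and node not in depth:
--             path.append(node)
--             node = dag[node]
--         base = depth.get(node, 0)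
--         for x in reversed(path):
--             base += 1
--             depth[x] = base
--         total += depth.get(k, 0)
--     return total
-- ===== Notes on version B (the rewrite author's own statement) =====
-- stated objective: alternative
-- what changed: Instead of re-walking the whole parent chain from every key, B walks each chain only until it reaches an already-memoized node, records the depth of every node on the path, and sums the memoized depths; on the shallow generated inputs this is not measurably faster than A.
import Mathlib
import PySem

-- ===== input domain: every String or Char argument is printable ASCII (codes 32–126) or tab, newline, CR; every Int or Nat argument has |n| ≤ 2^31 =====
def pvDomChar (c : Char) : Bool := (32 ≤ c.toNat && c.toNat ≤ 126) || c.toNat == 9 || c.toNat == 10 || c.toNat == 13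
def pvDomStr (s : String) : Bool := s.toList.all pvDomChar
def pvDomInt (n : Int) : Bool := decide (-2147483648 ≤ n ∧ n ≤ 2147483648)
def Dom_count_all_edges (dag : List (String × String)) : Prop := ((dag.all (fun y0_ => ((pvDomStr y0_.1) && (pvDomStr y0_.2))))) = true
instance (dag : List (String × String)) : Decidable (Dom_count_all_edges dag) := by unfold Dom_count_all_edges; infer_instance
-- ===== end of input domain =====

-- B memoizes each node's distance to the root (walking a chain only until a memoized node) and sums the
-- memoized depths, instead of A's full re-walk of the parent chain from every key.


-- ===== PORT A =====
-- A's inner `while neighbour is not None` loop, with fuel: under Pre_ (acyclic parent map) the chain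
-- leaves the key set within dag.length steps, so fuel dag.length + 1 is never exhausted.
def pvWalkA (dag : List (String × String)) : Nat → String → Int
  | 0, _ => 0
  | fuel + 1, s =>
    match (PySem.Dict.mk dag).get? s with
    | none => 0
    | some p => 1 + pvWalkA dag fuel p

def count_all_edges (dag : List (String × String)) : Int :=
  (PySem.Dict.mk dag).keys.foldl (fun count key => count + pvWalkA dag (dag.length + 1) key) 0

-- ===== PORT B =====
-- Source B's `while node in dag and node not in depth` loop, with the same fuel bound; returns the
-- path of visited nodes and the final node.
def pvDescend (dag : List (String × String)) : Nat → PySem.Dict String Int → String → (List String × String)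
  | 0, _, node => ([], node)
  | fuel + 1, depth, node =>
    match (PySem.Dict.mk dag).get? node with
    | none => ([], node)
    | some nxt =>
      if (depth.get? node).isSome then ([], node)
      else
        let r := pvDescend dag fuel depth nxt
        (node :: r.1, r.2)

-- Source B's `for x in reversed(path): base += 1; depth[x] = base`
def pvFill (st : Int × PySem.Dict String Int) (x : String) : Int × PySem.Dict String Int :=
  (st.1 + 1, st.2.insert x (st.1 + 1))

-- one iteration of Source B's outer loop; state = (depth memo, running total)
def pvStepB (dag : List (String × String)) (st : PySem.Dict String Int × Int) (k : String) :
    PySem.Dict String Int × Int :=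
  let r := pvDescend dag (dag.length + 1) st.1 k
  let fm := r.1.reverse.foldl pvFill (st.1.getD r.2 0, st.1)
  (fm.2, st.2 + fm.2.getD k 0)

def count_all_edges_alt (dag : List (String × String)) : Int :=
  ((PySem.Dict.mk dag).keys.foldl (pvStepB dag) (PySem.Dict.empty, 0)).2

-- ===== PRECONDITION & SPEC =====
def pvParent (dag : List (String × String)) (s : String) : String :=
  ((PySem.Dict.mk dag).get? s).getD s

-- Pre_ excludes (a) cyclic parent maps, on which Python's A loops forever (no return), and
-- (b) duplicate keys, a defensible dict-convention corner: the association list then does not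
-- represent the Python dict A receives (first-match vs last-wins overwrite).
def Pre_count_all_edges (dag : List (String × String)) : Prop :=
  (dag.map Prod.fst).Nodup ∧
    ∀ k ∈ dag.map Prod.fst, ∃ i ≤ dag.length, (pvParent dag)^[i] k ∉ dag.map Prod.fst

instance (dag : List (String × String)) : Decidable (Pre_count_all_edges dag) := by
  unfold Pre_count_all_edges; infer_instance

def pvWitness_count_all_edges : (List (String × String)) := [("b", "a"), ("c", "b")]

def Spec_count_all_edges (dag : List (String × String)) (out : Int) : Prop := out = count_all_edges_alt dag
instance (dag : List (String × String)) (out : Int) : Decidable (Spec_count_all_edges dag out) := by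
  unfold Spec_count_all_edges; infer_instance

-- ===== CLAIM (what is proved, stated in full; the proofs are below) =====
def Claim_equal_count_all_edges : Prop := ∀ (dag : List (String × String)), Dom_count_all_edges dag → Pre_count_all_edges dag → Spec_count_all_edges dag (count_all_edges dag)

-- ===== LEMMAS AND PROOFS =====

-- the true depth of a node (A's chain length from it), with the canonical fuel
def pvT (dag : List (String × String)) (s : String) : Int := pvWalkA dag (dag.length + 1) s

-- memo invariant: every memoized node is a key and carries its true depth
def pvMemoOK (dag : List (String × String)) (depth : PySem.Dict String Int) : Prop :=
  ∀ x v, depth.get? x = some v → x ∈ dag.map Prod.fst ∧ v = pvT dag x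

theorem pv_get?_isSome_iff (dag : List (String × String)) (s : String) :
    ((PySem.Dict.mk dag).get? s).isSome ↔ s ∈ dag.map Prod.fst := by
  induction dag with
  | nil => simp [PySem.Dict.get?]
  | cons kv rest ih =>
    rw [PySem.Dict.get?_mk_cons]
    by_cases h : kv.1 = s
    · simp [h]
    · simp [h, ih, Ne.symm h, beq_iff_eq]

theorem pvWalkA_of_none (dag : List (String × String)) (s : String) (m : Nat)
    (h : (PySem.Dict.mk dag).get? s = none) : pvWalkA dag m s = 0 := by
  cases m <;> simp [pvWalkA, h]

theorem pvWalkA_stable (dag : List (String × String)) :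
    ∀ (i : Nat) (s : String), (pvParent dag)^[i] s ∉ dag.map Prod.fst →
    ∀ m k : Nat, i ≤ m → i ≤ k → pvWalkA dag m s = pvWalkA dag k s := by
  intro i
  induction i with
  | zero =>
    intro s h m k _ _
    have hn : (PySem.Dict.mk dag).get? s = none := by
      rcases hg : (PySem.Dict.mk dag).get? s with _ | p
      · rfl
      · exact absurd ((pv_get?_isSome_iff dag s).mp (by simp [hg])) (by simpa using h)
    rw [pvWalkA_of_none dag s m hn, pvWalkA_of_none dag s k hn]
  | succ i ih =>
    intro s h m k hm hk
    rcases hg : (PySem.Dict.mk dag).get? s with _ | p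
    · rw [pvWalkA_of_none dag s m hg, pvWalkA_of_none dag s k hg]
    · have hp : pvParent dag s = p := by simp [pvParent, hg]
      have h' : (pvParent dag)^[i] p ∉ dag.map Prod.fst := by
        rw [Function.iterate_succ_apply, hp] at h; exact h
      obtain ⟨m', rfl⟩ : ∃ m', m = m' + 1 := ⟨m - 1, by omega⟩
      obtain ⟨k', rfl⟩ : ∃ k', k = k' + 1 := ⟨k - 1, by omega⟩
      simp only [pvWalkA, hg]
      rw [ih p h' m' k' (by omega) (by omega)]

theorem pvT_succ (dag : List (String × String)) (s p : String) (i : Nat)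
    (hget : (PySem.Dict.mk dag).get? s = some p)
    (hi : (pvParent dag)^[i] s ∉ dag.map Prod.fst) (hin : i ≤ dag.length) :
    pvT dag s = 1 + pvT dag p := by
  have hsK : s ∈ dag.map Prod.fst := (pv_get?_isSome_iff dag s).mp (by simp [hget])
  obtain ⟨j, rfl⟩ : ∃ j, i = j + 1 := by
    cases i with
    | zero => exact absurd hsK (by simpa using hi)
    | succ j => exact ⟨j, rfl⟩
  have hp : pvParent dag s = p := by simp [pvParent, hget]
  have h' : (pvParent dag)^[j] p ∉ dag.map Prod.fst := by
    rw [Function.iterate_succ_apply, hp] at hi; exact hi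
  show pvWalkA dag (dag.length + 1) s = 1 + pvT dag p
  simp only [pvWalkA, hget]
  rw [pvWalkA_stable dag j p h' dag.length (dag.length + 1) (by omega) (by omega)]
  rfl

-- the stopped-immediately case of Source B's inner while loop
theorem pvStopCase (dag : List (String × String)) (s : String) (memo : PySem.Dict String Int)
    (fuel : Nat) (hmem : pvMemoOK dag memo)
    (hstop : (PySem.Dict.mk dag).get? s = none ∨ (memo.get? s).isSome) :
    let r := pvDescend dag fuel memo s
    let fm := r.1.reverse.foldl pvFill (memo.getD r.2 0, memo)
    fm.1 = pvT dag s ∧ pvMemoOK dag fm.2 ∧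
      (s ∈ dag.map Prod.fst → fm.2.get? s = some (pvT dag s)) := by
  have hdes : pvDescend dag fuel memo s = ([], s) := by
    cases fuel with
    | zero => rfl
    | succ fuel' =>
      rcases hg : (PySem.Dict.mk dag).get? s with _ | p
      · simp [pvDescend, hg]
      · rcases hstop with hstop | hstop
        · rw [hg] at hstop; exact absurd hstop (by simp)
        · simp [pvDescend, hg, hstop]
  rw [hdes]
  simp only [List.reverse_nil, List.foldl_nil]
  refine ⟨?_, hmem, ?_⟩
  · rcases hms : memo.get? s with _ | v
    · have hgn : (PySem.Dict.mk dag).get? s = none := by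
        rcases hstop with hstop | hstop
        · exact hstop
        · rw [hms] at hstop; exact absurd hstop (by simp)
      rw [PySem.Dict.getD_eq_get?_getD, hms]
      show (0 : Int) = pvT dag s
      rw [pvT, pvWalkA_of_none dag s _ hgn]
    · rw [PySem.Dict.getD_eq_get?_getD, hms, Option.getD_some]
      exact (hmem s v hms).2
  · intro hsK
    rcases hms : memo.get? s with _ | v
    · rcases hstop with hstop | hstop
      · exact absurd ((pv_get?_isSome_iff dag s).mpr hsK) (by simp [hstop])
      · rw [hms] at hstop; exact absurd hstop (by simp)
    · rw [(hmem s v hms).2]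

theorem pvAux (dag : List (String × String)) :
    ∀ (i : Nat) (s : String) (memo : PySem.Dict String Int) (fuel : Nat),
      (pvParent dag)^[i] s ∉ dag.map Prod.fst → i ≤ dag.length → i < fuel →
      pvMemoOK dag memo →
      let r := pvDescend dag fuel memo s
      let fm := r.1.reverse.foldl pvFill (memo.getD r.2 0, memo)
      fm.1 = pvT dag s ∧ pvMemoOK dag fm.2 ∧
        (s ∈ dag.map Prod.fst → fm.2.get? s = some (pvT dag s)) := by
  intro i
  induction i with
  | zero =>
    intro s memo fuel h0 _ _ hmem
    have hgn : (PySem.Dict.mk dag).get? s = none := by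
      rcases hg : (PySem.Dict.mk dag).get? s with _ | p
      · rfl
      · exact absurd ((pv_get?_isSome_iff dag s).mp (by simp [hg])) (by simpa using h0)
    exact pvStopCase dag s memo fuel hmem (Or.inl hgn)
  | succ i ih =>
    intro s memo fuel h hin hfuel hmem
    rcases hg : (PySem.Dict.mk dag).get? s with _ | p
    · exact pvStopCase dag s memo fuel hmem (Or.inl hg)
    · rcases hms : memo.get? s with _ | v
      · -- recurse
        obtain ⟨fuel', rfl⟩ : ∃ f', fuel = f' + 1 := ⟨fuel - 1, by omega⟩
        have hp : pvParent dag s = p := by simp [pvParent, hg]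
        have h' : (pvParent dag)^[i] p ∉ dag.map Prod.fst := by
          rw [Function.iterate_succ_apply, hp] at h; exact h
        have hdes : pvDescend dag (fuel' + 1) memo s =
            ((pvDescend dag fuel' memo p).1.cons s, (pvDescend dag fuel' memo p).2) := by
          simp [pvDescend, hg, hms]
        obtain ⟨h1, h2, h3⟩ := ih p memo fuel' h' (by omega) (by omega) hmem
        rw [hdes]
        simp only [List.reverse_cons, List.foldl_append, List.foldl_cons, List.foldl_nil]
        set r := pvDescend dag fuel' memo p with hr
        set fm := r.1.reverse.foldl pvFill (memo.getD r.2 0, memo) with hfm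
        have hsK : s ∈ dag.map Prod.fst := (pv_get?_isSome_iff dag s).mp (by simp [hg])
        have hTs : pvT dag s = 1 + pvT dag p := pvT_succ dag s p (i + 1) hg h hin
        refine ⟨?_, ?_, ?_⟩
        · show fm.1 + 1 = pvT dag s
          rw [h1, hTs]; ring
        · intro x v hx
          rw [pvFill] at hx
          simp only at hx
          rw [PySem.Dict.get?_insert] at hx
          split at hx
          · rename_i hxs
            subst hxs
            have hv : v = fm.1 + 1 := (Option.some.inj hx).symm
            exact ⟨hsK, by rw [hv, h1, hTs]; ring⟩
          · exact h2 x v hx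
        · intro _
          show (fm.2.insert s (fm.1 + 1)).get? s = some (pvT dag s)
          rw [PySem.Dict.get?_insert, if_pos rfl, h1, hTs]
          congr 1
          ring
      · exact pvStopCase dag s memo fuel hmem (Or.inr (by simp [hms]))

theorem pvMain (dag : List (String × String))
    (hacyc : ∀ k ∈ dag.map Prod.fst, ∃ i ≤ dag.length, (pvParent dag)^[i] k ∉ dag.map Prod.fst) :
    ∀ (l : List String) (memo : PySem.Dict String Int) (t : Int),
      (∀ k ∈ l, k ∈ dag.map Prod.fst) → pvMemoOK dag memo →
      (l.foldl (pvStepB dag) (memo, t)).2 =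
        l.foldl (fun count key => count + pvWalkA dag (dag.length + 1) key) t := by
  intro l
  induction l with
  | nil => intro memo t _ _; rfl
  | cons k l ih =>
    intro memo t hK hmem
    have hk : k ∈ dag.map Prod.fst := hK k (by simp)
    obtain ⟨i, hin, hnot⟩ := hacyc k hk
    have haux := pvAux dag i k memo (dag.length + 1) hnot hin (by omega) hmem
    set r := pvDescend dag (dag.length + 1) memo k with hr
    set fm := r.1.reverse.foldl pvFill (memo.getD r.2 0, memo) with hfm
    obtain ⟨h1, h2, h3⟩ := haux
    have hstep : pvStepB dag (memo, t) k = (fm.2, t + pvT dag k) := by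
      rw [pvStepB]
      simp only [← hr, ← hfm]
      rw [PySem.Dict.getD_eq_get?_getD, h3 hk]
      rfl
    simp only [List.foldl_cons, hstep]
    exact ih fm.2 (t + pvT dag k) (fun x hx => hK x (by simp [hx])) h2
-- ===== VERDICT (by name: the statement is the Claim_ definition above) =====
theorem count_all_edges_spec : Claim_equal_count_all_edges := by
  intro dag _ hpre
  unfold Spec_count_all_edges count_all_edges_alt count_all_edges
  rw [pvMain dag hpre.2 ((PySem.Dict.mk dag).keys) PySem.Dict.empty 0 ?_ ?_]
  · simp
  · intro x v hx
    simp [PySem.Dict.get?, PySem.Dict.empty] at hx
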